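-- pv_equiv track=rewrite | github.com/zzq12-zzq/Automatic-Feature-Construction-Based-Genetic-Programming | ITACIE_GP/algo_subtwotreegp.py | delete_specific
-- ===== SOURCE A (Python) =====
-- def delete_specific(toolbox, pop, num_to_delete):
--     pop_dict = {i: pop.count(i) for i in pop}
--     pop_dict = {k: v for k, v in sorted(pop_dict.items(), key=lambda item: item[1], reverse=True)}
--
--     del_elements = []
--     for ind, count in pop_dict.items():
--         if count > 1 and len(del_elements) < num_to_delete:
--             del_elements.append(ind)
--         if len(del_elements) >= num_to_delete:
--             break
--
--     new_pop = [ind for ind in pop if ind not in del_elements]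
--
--     return new_pop
-- ===== SOURCE B (Python) =====
-- def delete_specific(toolbox, pop, num_to_delete):
--     counts = {}
--     for ind in pop:
--         counts[ind] = counts.get(ind, 0) + 1
--     delete = []
--     while len(delete) < num_to_delete:
--         best = None
--         for ind in counts:
--             if counts[ind] > 1 and ind not in delete:
--                 if best is None or counts[ind] > counts[best]:
--                     best = ind
--         if best is None:
--             break
--         delete.append(best)
--     return [ind for ind in pop if ind not in delete]
-- ===== Notes on version B (the rewrite author's own statement) =====
-- stated objective: alternative
-- what changed: B never sorts: it builds a counting dict in one pass and then repeatedly selects (selection-style, first strict maximum in dict insertion order) the most frequent not-yet-chosen duplicate, up to num_to_delete times, instead of A's per-element pop.count comprehension plus full descending sort with a break-loop.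
import Mathlib
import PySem

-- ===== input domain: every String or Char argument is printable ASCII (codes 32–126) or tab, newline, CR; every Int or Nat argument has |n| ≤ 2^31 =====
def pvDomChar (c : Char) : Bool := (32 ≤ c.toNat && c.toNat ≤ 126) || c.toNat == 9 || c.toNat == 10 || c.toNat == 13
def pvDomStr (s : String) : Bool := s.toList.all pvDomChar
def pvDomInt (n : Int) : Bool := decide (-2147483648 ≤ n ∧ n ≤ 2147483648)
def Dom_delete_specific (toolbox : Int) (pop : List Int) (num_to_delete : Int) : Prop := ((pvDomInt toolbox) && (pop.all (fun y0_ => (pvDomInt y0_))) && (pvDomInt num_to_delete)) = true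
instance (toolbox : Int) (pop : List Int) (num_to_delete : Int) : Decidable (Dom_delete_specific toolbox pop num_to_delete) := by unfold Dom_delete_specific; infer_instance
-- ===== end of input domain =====

-- B replaces A's per-element pop.count comprehension, full descending sort and break-loop by a
-- one-pass counting dict followed by a sort-free selection loop that repeatedly picks the most
-- frequent not-yet-chosen duplicate (objective: alternative).

-- ===== PORT A =====
-- the 'for ind, count in pop_dict.items(): …' loop with its break, transcribed
def pvALoop (num : Int) : List (Int × Int) → List Int → List Int
  | [], del => del
  | (ind, c) :: rest, del =>
    let del' := if 1 < c ∧ (del.length : Int) < num then del ++ [ind] else del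
    if num ≤ (del'.length : Int) then del' else pvALoop num rest del'

def delete_specific (toolbox : Int) (pop : List Int) (num_to_delete : Int) : List Int :=
  let pop_dict := pop.foldl (fun d i => d.insert i ((pop.count i : Int))) PySem.Dict.empty
  let sortedItems := PySem.List.sorted pop_dict.items (fun p => p.2) true
  let pop_dict2 := sortedItems.foldl (fun d p => d.insert p.1 p.2) PySem.Dict.empty
  let del_elements := pvALoop num_to_delete pop_dict2.items []
  pop.filter (fun ind => decide (ind ∉ del_elements))

-- ===== PORT B =====
-- B's inner 'for ind in counts:' scan choosing the first strict maximum among remaining duplicates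
def pvFindBest (counts : PySem.Dict Int Int) (delete : List Int) : Option Int :=
  counts.keys.foldl (fun best ind =>
    if 1 < counts.getD ind 0 ∧ ind ∉ delete then
      match best with
      | none => some ind
      | some b => if counts.getD b 0 < counts.getD ind 0 then some ind else some b
    else best) none

-- B's 'while len(delete) < num_to_delete:' loop; fuel = remaining capacity, break on best = None
def pvSelLoop (counts : PySem.Dict Int Int) : Nat → List Int → List Int
  | 0, del => del
  | fuel+1, del =>
    match pvFindBest counts del with
    | none => del
    | some b => pvSelLoop counts fuel (del ++ [b])

def delete_specific_alt (toolbox : Int) (pop : List Int) (num_to_delete : Int) : List Int :=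
  let counts := pop.foldl (fun d x => d.insert x (d.getD x 0 + 1)) PySem.Dict.empty
  let delete := pvSelLoop counts num_to_delete.toNat []
  pop.filter (fun ind => decide (ind ∉ delete))

-- ===== PRECONDITION & SPEC =====
def Spec_delete_specific (toolbox : Int) (pop : List Int) (num_to_delete : Int) (out : List Int) : Prop := out = delete_specific_alt toolbox pop num_to_delete
instance (toolbox : Int) (pop : List Int) (num_to_delete : Int) (out : List Int) : Decidable (Spec_delete_specific toolbox pop num_to_delete out) := by unfold Spec_delete_specific; infer_instance

-- ===== CLAIM (what is proved, stated in full; the proofs are below) =====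
def Claim_equal_delete_specific : Prop := ∀ (toolbox : Int) (pop : List Int) (num_to_delete : Int), Dom_delete_specific toolbox pop num_to_delete → Spec_delete_specific toolbox pop num_to_delete (delete_specific toolbox pop num_to_delete)

-- ===== LEMMAS AND PROOFS =====

-- A's dict comprehension {i: pop.count(i) for i in pop}: its items are the distinct elements
-- of l in first-occurrence order, each paired with f of the key
lemma pv_items_foldl_insert_const (f : Int → Int) (l : List Int) :
    (l.foldl (fun d i => d.insert i (f i)) PySem.Dict.empty).items
      = (PySem.Set.ofList l).map (fun k => (k, f k)) := by
  induction l using List.reverseRecOn with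
  | nil => rfl
  | append_singleton l x ih =>
    rw [List.foldl_append]
    simp only [List.foldl_cons, List.foldl_nil]
    have hkeys : (List.foldl (fun d i => d.insert i (f i)) PySem.Dict.empty l).keys
        = PySem.Set.ofList l := by
      have h := PySem.Dict.keys_foldl_insert l (fun _ i => f i) PySem.Dict.empty
      simpa [PySem.Dict.keys_empty, PySem.Set.update, PySem.Set.ofList_eq_foldl] using h
    rw [PySem.Dict.items_insert, PySem.Dict.contains_eq_decide_mem_keys, hkeys]
    by_cases hx : x ∈ l
    · have hmem : x ∈ PySem.Set.ofList l := (PySem.Set.mem_ofList l x).mpr hx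
      have hset : PySem.Set.ofList (l ++ [x]) = PySem.Set.ofList l := by
        rw [PySem.Set.ofList_eq_foldl, List.foldl_append]
        simp only [List.foldl_cons, List.foldl_nil]
        rw [← PySem.Set.ofList_eq_foldl]
        simp [PySem.Set.add, hmem]
      simp only [hmem, decide_true, if_true, ih, List.map_map, hset]
      apply List.map_congr_left
      intro k hk
      by_cases hkx : k = x
      · subst hkx; simp
      · simp [hkx]
    · have hmem : x ∉ PySem.Set.ofList l := fun h => hx ((PySem.Set.mem_ofList l x).mp h)
      have hset : PySem.Set.ofList (l ++ [x]) = PySem.Set.ofList l ++ [x] := by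
        rw [PySem.Set.ofList_eq_foldl, List.foldl_append]
        simp only [List.foldl_cons, List.foldl_nil]
        rw [← PySem.Set.ofList_eq_foldl]
        simp [PySem.Set.add, hmem]
      simp [hmem, ih, hset]

-- inserting an element strictly greater (under key) than everything present puts it in front
lemma pv_insertBy_front {α : Type} (key : α → Int) (x : α) (zs : List α)
    (h : ∀ z ∈ zs, key z < key x) :
    PySem.List.insertBy (fun a b => decide (key b < key a)) x zs = x :: zs := by
  cases zs with
  | nil => simp [PySem.List.insertBy]
  | cons z zs => simp [PySem.List.insertBy, h z (by simp)]

-- insertBy (reverse order) commutes with filter on a descending-sorted list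
lemma pv_filter_insertBy {α : Type} (key : α → Int) (q : α → Bool) (x : α) (ys : List α)
    (hys : ys.Pairwise (fun a b => key b ≤ key a)) :
    (PySem.List.insertBy (fun a b => decide (key b < key a)) x ys).filter q
      = if q x then PySem.List.insertBy (fun a b => decide (key b < key a)) x (ys.filter q)
        else ys.filter q := by
  induction ys with
  | nil => cases hqx : q x <;> simp [PySem.List.insertBy, hqx]
  | cons y ys ih =>
    have hhead : ∀ b ∈ ys, key b ≤ key y := (List.pairwise_cons.mp hys).1
    have htail : ys.Pairwise (fun a b => key b ≤ key a) := (List.pairwise_cons.mp hys).2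
    by_cases hxy : key y < key x
    · cases hqx : q x with
      | true =>
        cases hqy : q y with
        | true => simp [PySem.List.insertBy, hxy, hqx, hqy]
        | false =>
          have hfront : PySem.List.insertBy (fun a b => decide (key b < key a)) x
              (ys.filter q) = x :: ys.filter q := by
            apply pv_insertBy_front
            intro z hz
            exact lt_of_le_of_lt (hhead z (List.mem_of_mem_filter hz)) hxy
          simp [PySem.List.insertBy, hxy, hqx, hqy, hfront]
      | false => simp [PySem.List.insertBy, hxy, hqx]
    · cases hqx : q x with
      | true =>
        cases hqy : q y with
        | true => simp [PySem.List.insertBy, hxy, hqx, hqy, ih htail]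
        | false => simp [PySem.List.insertBy, hxy, hqx, hqy, ih htail]
      | false =>
        cases hqy : q y with
        | true => simp [PySem.List.insertBy, hxy, hqx, hqy, ih htail]
        | false => simp [PySem.List.insertBy, hxy, hqx, hqy, ih htail]

-- one more element through the reverse insertion sort
lemma pv_sorted_rev_concat {α : Type} (key : α → Int) (xs : List α) (x : α) :
    PySem.List.sorted (xs ++ [x]) key true
      = PySem.List.insertBy (fun a b => decide (key b < key a)) x
          (PySem.List.sorted xs key true) := by
  rw [PySem.List.sorted_rev_eq_foldl_insertBy, PySem.List.sorted_rev_eq_foldl_insertBy,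
    List.foldl_append]
  rfl

-- stable reverse sort commutes with filter
lemma pv_sorted_rev_filter {α : Type} (key : α → Int) (q : α → Bool) (xs : List α) :
    (PySem.List.sorted xs key true).filter q = PySem.List.sorted (xs.filter q) key true := by
  induction xs using List.reverseRecOn with
  | nil => rfl
  | append_singleton xs x ih =>
    rw [pv_sorted_rev_concat,
      pv_filter_insertBy key q x _ (PySem.List.sorted_pairwise_rev xs key), List.filter_append]
    cases hqx : q x with
    | true => simp [hqx, ih, pv_sorted_rev_concat]
    | false => simp [hqx, ih]

lemma pv_map_insertBy {α β : Type} (g : α → β) (key : β → Int) (x : α) (ys : List α) :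
    PySem.List.insertBy (fun a b => decide (key b < key a)) (g x) (ys.map g)
      = (PySem.List.insertBy (fun a b => decide (key (g b) < key (g a))) x ys).map g := by
  induction ys with
  | nil => simp [PySem.List.insertBy]
  | cons y ys ih =>
    by_cases h : key (g y) < key (g x) <;> simp [PySem.List.insertBy, h, ih]

-- stable reverse sort commutes with map (key composed accordingly)
lemma pv_sorted_rev_map {α β : Type} (g : α → β) (key : β → Int) (xs : List α) :
    PySem.List.sorted (xs.map g) key true
      = (PySem.List.sorted xs (fun a => key (g a)) true).map g := by
  induction xs using List.reverseRecOn with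
  | nil => rfl
  | append_singleton xs x ih =>
    rw [List.map_append]
    simp only [List.map_cons, List.map_nil]
    rw [pv_sorted_rev_concat, pv_sorted_rev_concat, ih, pv_map_insertBy]

-- A's break-loop collects the first (num - |del|) keys with count > 1
lemma pv_pvALoop_eq_take (num : Int) :
    ∀ (items : List (Int × Int)) (del : List Int), (del.length : Int) < num →
      pvALoop num items del
        = del ++ ((items.filter (fun p => decide (1 < p.2))).map (fun p => p.1)).take
            (num - del.length).toNat := by
  intro items
  induction items with
  | nil => intro del _; simp [pvALoop]
  | cons p rest ih =>
    obtain ⟨ind, c⟩ := p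
    intro del hlen
    by_cases hc : 1 < c
    · by_cases hstop : num ≤ (del.length : Int) + 1
      · have h1 : (num - (del.length : Int)).toNat = 1 := by omega
        simp [pvALoop, hc, hlen, hstop, h1]
      · have hrec := ih (del ++ [ind]) (by simp; omega)
        have hstep : pvALoop num ((ind, c) :: rest) del = pvALoop num rest (del ++ [ind]) := by
          simp only [pvALoop]
          rw [if_pos (show 1 < c ∧ (del.length : Int) < num from ⟨hc, hlen⟩),
            if_neg (show ¬ num ≤ ((((del ++ [ind]).length : Nat)) : Int) by simp; omega)]
        rw [hstep, hrec, List.filter_cons_of_pos (by simpa using hc), List.map_cons]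
        have h2' : (num - ((del.length : Int))).toNat
            = (num - (((del ++ [ind]).length : Nat) : Int)).toNat + 1 := by
          simp; omega
        rw [h2', List.take_succ_cons, List.append_assoc, List.singleton_append]
    · have hnostop : ¬ num ≤ (del.length : Int) := by omega
      simp only [pvALoop, hc, false_and, if_false, hnostop]
      rw [ih del hlen]
      simp [List.filter_cons, hc]

lemma pv_pvALoop_nonpos (num : Int) (h : num ≤ 0) (items : List (Int × Int)) :
    pvALoop num items [] = [] := by
  cases items with
  | nil => rfl
  | cons p rest =>
    obtain ⟨ind, c⟩ := p
    simp [pvALoop, show ¬((0:Int) < num) by omega, show num ≤ 0 from h]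

-- ===== B-side lemmas: the selection loop picks the descending-sorted prefix =====

-- first strict maximum of a list, as B's fold computes it on the filtered candidates
def pvFM (key : Int → Int) (l : List Int) : Option Int :=
  l.foldl (fun best x => match best with
    | none => some x
    | some b => if key b < key x then some x else some b) none

-- a guarded fold is the unguarded fold of the filtered list
lemma pv_fold_guard (key : Int → Int) (q : Int → Prop) [DecidablePred q] (l : List Int) :
    ∀ acc : Option Int,
      l.foldl (fun best x => if q x then (match best with
          | none => some x
          | some b => if key b < key x then some x else some b) else best) acc
        = (l.filter (fun x => decide (q x))).foldl (fun best x => match best with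
          | none => some x
          | some b => if key b < key x then some x else some b) acc := by
  induction l with
  | nil => intro acc; rfl
  | cons y l ih =>
    intro acc
    by_cases hy : q y
    · simp [List.filter_cons, hy, List.foldl_cons, ih]
    · simp [List.filter_cons, hy, List.foldl_cons, ih]

lemma pv_pvFM_concat (key : Int → Int) (l : List Int) (x : Int) :
    pvFM key (l ++ [x]) = match pvFM key l with
      | none => some x
      | some b => if key b < key x then some x else some b := by
  simp [pvFM, List.foldl_append]

-- first strict maximum = head of the stable descending sort
lemma pv_pvFM_eq_head (key : Int → Int) (l : List Int) :
    pvFM key l = (PySem.List.sorted l key true).head? := by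
  induction l using List.reverseRecOn with
  | nil => rfl
  | append_singleton l x ih =>
    rw [pv_pvFM_concat, pv_sorted_rev_concat, ih]
    cases hS : PySem.List.sorted l key true with
    | nil => simp [PySem.List.insertBy]
    | cons h t =>
      by_cases hcmp : key h < key x
      · simp [PySem.List.insertBy, hcmp]
      · simp [PySem.List.insertBy, hcmp]

-- filtering a nodup concatenation by "not in the first part" leaves the second part
lemma pv_filter_not_mem_append {α : Type} [DecidableEq α] (l1 l2 : List α)
    (h : (l1 ++ l2).Nodup) :
    (l1 ++ l2).filter (fun x => decide (x ∉ l1)) = l2 := by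
  rw [List.filter_append]
  have hne : ∀ a ∈ l1, ∀ b ∈ l2, a ≠ b := (List.nodup_append.mp h).2.2
  have h1 : l1.filter (fun x => decide (x ∉ l1)) = [] := by
    apply List.filter_eq_nil_iff.mpr
    intro a ha
    simp [ha]
  have h2 : l2.filter (fun x => decide (x ∉ l1)) = l2 := by
    apply List.filter_eq_self.mpr
    intro a ha
    simp only [decide_eq_true_eq]
    intro hmem
    exact hne a hmem a ha rfl
  rw [h1, h2, List.nil_append]

-- filtering a nodup list by "not in its take i" leaves its drop i
lemma pv_filter_not_mem_take {α : Type} [DecidableEq α] (S : List α) (hS : S.Nodup) (i : Nat) :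
    S.filter (fun x => decide (x ∉ S.take i)) = S.drop i := by
  have h := pv_filter_not_mem_append (S.take i) (S.drop i)
      (by rw [List.take_append_drop]; exact hS)
  rw [List.take_append_drop] at h
  exact h

-- B's selection loop, run on a prefix of the sorted candidate list, extends that prefix
lemma pv_selLoop_take (counts : PySem.Dict Int Int) (S : List Int) (hS : S.Nodup)
    (hbest : ∀ del : List Int, pvFindBest counts del
        = (S.filter (fun x => decide (x ∉ del))).head?) :
    ∀ (fuel i : Nat), pvSelLoop counts fuel (S.take i) = S.take (i + fuel) := by
  intro fuel
  induction fuel with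
  | zero => intro i; simp [pvSelLoop]
  | succ fuel ih =>
    intro i
    rw [pvSelLoop, hbest, pv_filter_not_mem_take S hS i]
    cases hdrop : S.drop i with
    | nil =>
      have hlen : S.length ≤ i := by
        have := congrArg List.length hdrop
        simp at this
        omega
      simp [List.take_of_length_le hlen, List.take_of_length_le (Nat.le_add_right_of_le hlen)]
    | cons b rest =>
      simp only [List.head?_cons]
      have hget : S[i]? = some b := by
        rw [← List.head?_drop, hdrop]
        rfl
      have htake : S.take i ++ [b] = S.take (i + 1) := by
        rw [List.take_succ, hget]
        rfl
      rw [htake, ih (i+1)]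
      congr 1
      omega

-- the two implementations agree
lemma pv_main (toolbox : Int) (pop : List Int) (num : Int) :
    delete_specific toolbox pop num = delete_specific_alt toolbox pop num := by
  simp only [delete_specific, delete_specific_alt]
  have hitems := pv_items_foldl_insert_const (fun i => ((pop.count i : Nat) : Int)) pop
  have hcounts : pop.foldl (fun d x => d.insert x (d.getD x 0 + 1)) PySem.Dict.empty
      = PySem.Dict.counter pop := PySem.Dict.foldl_insert_getD_add_one_eq_counter pop
  set SL := PySem.Set.ofList pop with hSL
  set g : Int → Int × Int := fun k => (k, ((pop.count k : Nat) : Int)) with hg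
  set keyB : Int → Int := fun k => ((pop.count k : Nat) : Int) with hkeyB
  set r : Int → Bool := fun k => decide ((1:Int) < ((pop.count k : Nat) : Int)) with hr
  -- S: the duplicates in stable descending order of count; T: its prefix of length num
  set S : List Int := PySem.List.sorted (SL.filter r) keyB true with hSdef
  set T : List Int := S.take num.toNat with hT
  have hkey : (fun k : Int => (PySem.Dict.counter pop).getD k 0) = keyB := by
    funext k
    simpa [hkeyB] using PySem.Dict.getD_counter pop k
  -- A's sorted items list
  have hS : PySem.List.sorted (SL.map g) (fun p => p.2) true
      = (PySem.List.sorted SL keyB true).map g := by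
    have h := pv_sorted_rev_map g (fun p : Int × Int => p.2) SL
    simpa [hg, hkeyB] using h
  have hFA : ((((PySem.List.sorted SL keyB true).map g).filter
        (fun p => decide (1 < p.2))).map (fun p => p.1)) = S := by
    rw [List.filter_map, List.map_map]
    have h1 : ((fun p : Int × Int => decide (1 < p.2)) ∘ g) = r := rfl
    have h2 : ((fun p : Int × Int => p.1) ∘ g) = id := rfl
    rw [h1, h2, List.map_id, pv_sorted_rev_filter]
  have hD2 : ∀ (Sl : List (Int × Int)), (Sl.map Prod.fst).Nodup →
      (Sl.foldl (fun d p => d.insert p.1 p.2) PySem.Dict.empty).items = Sl := by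
    intro Sl hnd
    have h := PySem.Dict.items_foldl_insert_fresh Sl Prod.fst Prod.snd PySem.Dict.empty
        (fun a _ => PySem.Dict.contains_empty a.1) hnd
    simpa [PySem.Dict.empty] using h
  have hndSL : SL.Nodup := PySem.Set.nodup_ofList pop
  have hndS : (((PySem.List.sorted SL keyB true).map g).map Prod.fst).Nodup := by
    rw [List.map_map]
    have h2 : (Prod.fst ∘ g) = id := rfl
    rw [h2, List.map_id]
    exact ((PySem.List.sorted_perm SL keyB true).nodup_iff).mpr hndSL
  -- A's side computes T
  have hA : pvALoop num ((PySem.List.sorted (SL.map g) (fun p => p.2) true).foldl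
        (fun d p => d.insert p.1 p.2) PySem.Dict.empty).items [] = T := by
    rw [hS, hD2 _ hndS]
    by_cases hnum : 0 < num
    · rw [pv_pvALoop_eq_take num _ [] (by simpa using hnum)]
      simp [hFA, hT]
    · rw [pv_pvALoop_nonpos num (by omega) _]
      have h0 : num.toNat = 0 := by omega
      simp [hT, h0]
  -- B's side: the selection loop also computes T
  have hSnodup : S.Nodup :=
    ((PySem.List.sorted_perm (SL.filter r) keyB true).nodup_iff).mpr (hndSL.filter r)
  have hbest : ∀ del : List Int, pvFindBest (PySem.Dict.counter pop) del
      = (S.filter (fun x => decide (x ∉ del))).head? := by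
    intro del
    have hkeys : (PySem.Dict.counter pop).keys = SL := by
      rw [PySem.Dict.keys_counter]
    have hguard : pvFindBest (PySem.Dict.counter pop) del
        = pvFM keyB (SL.filter (fun x => decide (r x = true ∧ x ∉ del))) := by
      unfold pvFindBest pvFM
      rw [hkeys]
      have := pv_fold_guard keyB (fun x => r x = true ∧ x ∉ del) SL none
      rw [← this]
      apply List.foldl_ext
      intro best x _
      have hgx : (1 < (PySem.Dict.counter pop).getD x 0 ∧ x ∉ del)
          ↔ (r x = true ∧ x ∉ del) := by
        rw [show (PySem.Dict.counter pop).getD x 0 = keyB x from by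
          simpa [hkeyB] using PySem.Dict.getD_counter pop x]
        simp [hr, hkeyB]
      by_cases hq : r x = true ∧ x ∉ del
      · rw [if_pos (hgx.mpr hq), if_pos hq]
        cases best with
        | none => rfl
        | some b =>
          simp [PySem.Dict.getD_counter, hkeyB]
      · rw [if_neg (fun h => hq (hgx.mp h)), if_neg hq]
    have hsplit : SL.filter (fun x => decide (r x = true ∧ x ∉ del))
        = (SL.filter r).filter (fun x => decide (x ∉ del)) := by
      rw [List.filter_filter]
      apply List.filter_congr
      intro x _
      by_cases h1 : r x = true <;> by_cases h2 : x ∈ del <;> simp [h1, h2]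
    rw [hguard, hsplit, pv_pvFM_eq_head, ← pv_sorted_rev_filter, hSdef]
  have hB : pvSelLoop (PySem.Dict.counter pop) num.toNat [] = T := by
    have := pv_selLoop_take (PySem.Dict.counter pop) S hSnodup hbest num.toNat 0
    simpa [hT] using this
  simp only [hitems, hcounts]
  rw [hA, hB]

-- ===== VERDICT (by name: the statement is the Claim_ definition above) =====
theorem delete_specific_spec : Claim_equal_delete_specific := by
  intro toolbox pop num_to_delete _
  unfold Spec_delete_specific
  exact pv_main toolbox pop num_to_delete
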